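-- pv_equiv track=rewrite | github.com/pycogent/old-cogent | old_cogent/parse/aaindex.py | _get_field
-- ===== SOURCE A (Python) =====
-- def _get_field(field_identifier, lines):
--     """ Returns the field identified as a one line string
--     """
--     i = 0
--     result = ''
--     # Concatenate multi-line data with line_split
--     line_split = ' '
--     # Run through all lines in the current record
--     while (i < len(lines)):
--         # Check each line to see if it starts with the field
--         # identifier we are looking for
--         if (lines[i].startswith(field_identifier)):
--             # If we find the line we are looking for, include it in
--             # the result, unless it's a Data line.
--             # Data entries are multi-line, and the first is information
--             # that we are not interested in here.
--             if (field_identifier != 'I'):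
--                 result += lines[i]
--                 if field_identifier == 'M': result += 'BRK'
--                 # Get rid of the line identifier and leading white space
--                 result = result[2:]
--             # Move to next line
--             i += 1
--             # and see if it's a continuation from the above line
--             while (i < len(lines) and\
--                  (lines[i].startswith(' ') or\
--                  lines[i].startswith(field_identifier))):
--                 # if continuation combine the lines while treating the
--                 # spaces nicely, ie, multiple spaces -> one space
--                 # this is mostly just important for the
--                 # lines that are strings such as title
--                 result = result.rstrip() + line_split + lines[i].lstrip()
--                 i += 1
--             break
--         i += 1
--     # return the field of interest
--     return result
-- ===== SOURCE B (Python) =====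
-- def _get_field(field_identifier, lines):
--     # Phase 1: index of the first line carrying the field (None if absent).
--     start = next((i for i, l in enumerate(lines)
--                   if l.startswith(field_identifier)), None)
--     if start is None:
--         return ''
--     line = lines[start]
--     # Phase 2: the head ('I' data lines contribute no head text).
--     if field_identifier == 'I':
--         head = ''
--     elif field_identifier == 'M':
--         head = (line + 'BRK')[2:]
--     else:
--         head = line[2:]
--     # Phase 3: the run of continuation lines = tail[:stop].
--     tail = lines[start + 1:]
--     stop = next((j for j, l in enumerate(tail)
--                  if not (l.startswith(' ') or l.startswith(field_identifier))),
--                 len(tail))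
--     run = tail[:stop]
--     if not run:
--         return head
--     # Phase 4: closed-form assembly — one ' '.join instead of A's repeated
--     # rstrip of the growing accumulator: empty stripped middle lines vanish,
--     # the head is rstripped once, the last line only lstripped.
--     middles = [s for s in (l.strip() for l in run[:-1]) if s]
--     return ' '.join([head.rstrip()] + middles + [run[-1].lstrip()])
-- ===== Notes on version B (the rewrite author's own statement) =====
-- stated objective: simpler
-- what changed: A accumulates the result by repeatedly rstripping the growing string inside its while loop; B computes the same value in closed form: locate the field line, slice the head, take the continuation run, and emit one ' '.join of [rstripped head] + non-empty stripped middle lines + [lstripped last line], with no accumulator at all.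
import Mathlib
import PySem

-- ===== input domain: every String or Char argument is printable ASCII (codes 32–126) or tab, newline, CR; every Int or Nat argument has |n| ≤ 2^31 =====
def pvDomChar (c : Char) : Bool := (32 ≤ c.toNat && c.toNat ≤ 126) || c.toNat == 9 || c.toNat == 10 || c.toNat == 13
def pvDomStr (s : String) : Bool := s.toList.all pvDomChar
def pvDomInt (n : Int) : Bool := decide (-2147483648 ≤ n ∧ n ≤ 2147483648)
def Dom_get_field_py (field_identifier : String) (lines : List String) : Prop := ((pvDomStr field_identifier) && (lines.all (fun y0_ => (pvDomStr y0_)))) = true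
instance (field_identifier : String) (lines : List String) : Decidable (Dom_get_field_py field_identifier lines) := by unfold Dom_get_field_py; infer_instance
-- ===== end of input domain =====

-- B replaces A's accumulator loop (repeated rstrip of the growing result) by one closed-form
-- ' '.join of rstripped head, non-empty stripped middle lines and lstripped last line: simpler.

-- ===== PORT A =====
-- inner while of A: fold continuation lines into result while they start with ' ' or the identifier
def pvAInner (fid : String) : List String → String → String
  | [], res => res
  | l :: rest, res =>
    if PySem.Str.startswith l " " || PySem.Str.startswith l fid then
      pvAInner fid rest (PySem.Str.rstrip res ++ " " ++ PySem.Str.lstrip l)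
    else res

-- outer while of A: scan for the first line starting with fid, build the head, enter the inner while
def pvAOuter (fid : String) : List String → String
  | [] => ""
  | l :: rest =>
    if PySem.Str.startswith l fid then
      pvAInner fid rest
        (if fid ≠ "I" then
          PySem.Str.slice ((("" ++ l) ++ (if fid = "M" then "BRK" else ""))) (some 2) none
        else "")
    else pvAOuter fid rest

def get_field_py (field_identifier : String) (lines : List String) : String :=
  pvAOuter field_identifier lines

-- ===== PORT B =====
-- phase 1 of Source B fused: next((i, l) …) + lines[start] + lines[start+1:] as one structural scan
def pvBFind (fid : String) : List String → Option (String × List String)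
  | [] => none
  | l :: rest => if PySem.Str.startswith l fid then some (l, rest) else pvBFind fid rest

-- phase 3 of Source B: stop = next((j for j, l in enumerate(tail) if not continuation), len(tail))
def pvBStop (fid : String) : List String → Nat
  | [] => 0
  | l :: rest =>
    if PySem.Str.startswith l " " || PySem.Str.startswith l fid then pvBStop fid rest + 1 else 0

def get_field_py_alt (field_identifier : String) (lines : List String) : String :=
  match pvBFind field_identifier lines with
  | none => ""
  | some (line, tail) =>
    let head :=
      if field_identifier = "I" then ""
      else if field_identifier = "M" then PySem.Str.slice (line ++ "BRK") (some 2) none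
      else PySem.Str.slice line (some 2) none
    let run := tail.take (pvBStop field_identifier tail)
    match run.getLast? with
    | none => head
    | some last =>
      let middles := (run.dropLast.map PySem.Str.strip).filter (fun s => s ≠ "")
      PySem.Str.join " " ([PySem.Str.rstrip head] ++ middles ++ [PySem.Str.lstrip last])

-- ===== PRECONDITION & SPEC =====
def Spec_get_field_py (field_identifier : String) (lines : List String) (out : String) : Prop := out = get_field_py_alt field_identifier lines
instance (field_identifier : String) (lines : List String) (out : String) : Decidable (Spec_get_field_py field_identifier lines out) := by unfold Spec_get_field_py; infer_instance

-- ===== CLAIM (what is proved, stated in full; the proofs are below) =====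
def Claim_equal_get_field_py : Prop := ∀ (field_identifier : String) (lines : List String), Dom_get_field_py field_identifier lines → Spec_get_field_py field_identifier lines (get_field_py field_identifier lines)

-- ===== LEMMAS AND PROOFS =====

-- rstrip over an append: trailing whitespace is taken from the right part unless it is all whitespace
theorem pv_rstrip_append (a b : List Char) :
    PySem.Chars.rstrip (a ++ b) =
      if PySem.Chars.rstrip b = [] then PySem.Chars.rstrip a else a ++ PySem.Chars.rstrip b := by
  simp only [PySem.Chars.rstrip, List.reverse_append, List.dropWhile_append]
  by_cases h : (b.reverse.dropWhile PySem.Chars.isspace).isEmpty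
  · simp [List.isEmpty_iff.mp h]
  · have h' : ¬ ((b.reverse.dropWhile PySem.Chars.isspace).reverse = []) := by
      simp [List.isEmpty_iff] at h ⊢; exact h
    simp [h, h']

theorem pv_rstrip_idem (a : List Char) :
    PySem.Chars.rstrip (PySem.Chars.rstrip a) = PySem.Chars.rstrip a := by
  simp [PySem.Chars.rstrip, List.dropWhile_idempotent]

-- the key step fact: rstrip of A's accumulator after one join
theorem pv_rstrip_step (x l : List Char) :
    PySem.Chars.rstrip (PySem.Chars.rstrip x ++ ' ' :: PySem.Chars.lstrip l) =
      if PySem.Chars.strip l = [] then PySem.Chars.rstrip x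
      else PySem.Chars.rstrip x ++ ' ' :: PySem.Chars.strip l := by
  have hsp : PySem.Chars.rstrip (' ' :: PySem.Chars.lstrip l) =
      if PySem.Chars.strip l = [] then [] else ' ' :: PySem.Chars.strip l := by
    have h1 := pv_rstrip_append [' '] (PySem.Chars.lstrip l)
    simp only [List.singleton_append] at h1
    rw [h1, show PySem.Chars.strip l = PySem.Chars.rstrip (PySem.Chars.lstrip l) from rfl]
    by_cases h : PySem.Chars.rstrip (PySem.Chars.lstrip l) = []
    · rw [if_pos h, if_pos h]; decide
    · rw [if_neg h, if_neg h]
  rw [pv_rstrip_append, hsp]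
  by_cases h : PySem.Chars.strip l = [] <;> simp [h, pv_rstrip_idem]

-- B's join form of the result (head, middle continuation lines, last continuation line)
def pvJoinForm (head : String) (mids : List String) (last : String) : String :=
  PySem.Str.join " " ([PySem.Str.rstrip head] ++
    ((mids.map PySem.Str.strip).filter (fun s => s ≠ "")) ++ [PySem.Str.lstrip last])

-- pull an already-joined first piece apart inside a join
theorem pv_join_pull (a b : List Char) (xs : List (List Char)) :
    PySem.Chars.join [' '] ((a ++ ' ' :: b) :: xs) = a ++ ' ' :: PySem.Chars.join [' '] (b :: xs) := by
  cases xs with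
  | nil => simp [PySem.Chars.join_singleton]
  | cons c t =>
    rw [PySem.Chars.join_cons_cons, PySem.Chars.join_cons_cons]
    simp

-- the join form with no middles is just the single A-step
theorem pvJoinForm_base (head last : String) :
    pvJoinForm head [] last = PySem.Str.rstrip head ++ " " ++ PySem.Str.lstrip last := by
  apply String.toList_inj.mp
  simp [pvJoinForm, PySem.Str.join, PySem.Chars.join_cons_cons, PySem.Chars.join_singleton,
    PySem.Str.rstrip, PySem.Str.lstrip]

-- one A-step folded into the head equals extending the middles of the join form
theorem pvJoinForm_step (head m last : String) (t : List String) :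
    pvJoinForm (PySem.Str.rstrip head ++ " " ++ PySem.Str.lstrip m) t last =
      pvJoinForm head (m :: t) last := by
  apply String.toList_inj.mp
  simp only [pvJoinForm, PySem.Str.join, String.toList_ofList, List.map_cons, List.map_append,
    List.filter_cons, List.cons_append, List.nil_append]
  have hx : (PySem.Str.rstrip head ++ " " ++ PySem.Str.lstrip m).toList =
      PySem.Chars.rstrip head.toList ++ ' ' :: PySem.Chars.lstrip m.toList := by
    simp [PySem.Str.rstrip, PySem.Str.lstrip]
  have hr : (PySem.Str.rstrip (PySem.Str.rstrip head ++ " " ++ PySem.Str.lstrip m)).toList =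
      PySem.Chars.rstrip ((PySem.Str.rstrip head ++ " " ++ PySem.Str.lstrip m).toList) := by
    simp [PySem.Str.rstrip]
  by_cases h : PySem.Str.strip m = ""
  · have h' : PySem.Chars.strip m.toList = [] := by
      have := congrArg String.toList h; simpa [PySem.Str.strip] using this
    simp only [h, ne_eq, not_true_eq_false, decide_false]
    rw [hr, hx, pv_rstrip_step, if_pos h']
    simp [PySem.Str.rstrip]
  · have h' : PySem.Chars.strip m.toList ≠ [] := by
      intro hc; apply h; apply String.toList_inj.mp; simpa [PySem.Str.strip] using hc
    simp only [ne_eq, h, not_false_eq_true, decide_true, if_true]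
    rw [hr, hx, pv_rstrip_step, if_neg h']
    rw [show (" " : String).toList = [' '] from rfl]
    simp only [List.map_cons, List.map_nil, List.cons_append]
    rw [pv_join_pull, PySem.Chars.join_cons_cons]
    simp [PySem.Str.rstrip, PySem.Str.strip]

-- A's inner while over mids ++ [last] ++ rest (rest starting with a non-continuation line)
-- computes B's join form
theorem pvAInner_run (fid last : String) (rest : List String)
    (hr : ∀ a, rest.head? = some a →
      (PySem.Str.startswith a " " || PySem.Str.startswith a fid) = false) :
    ∀ (mids : List String) (head : String),
      (∀ l ∈ mids ++ [last], (PySem.Str.startswith l " " || PySem.Str.startswith l fid) = true) →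
      pvAInner fid (mids ++ [last] ++ rest) head = pvJoinForm head mids last := by
  intro mids
  induction mids with
  | nil =>
    intro head hall
    have hl := hall last (by simp)
    simp only [List.nil_append, List.cons_append, pvAInner, hl, if_true]
    have hstop : pvAInner fid rest (PySem.Str.rstrip head ++ " " ++ PySem.Str.lstrip last) =
        PySem.Str.rstrip head ++ " " ++ PySem.Str.lstrip last := by
      cases hd : rest with
      | nil => rfl
      | cons a b =>
        have ha := hr a (by rw [hd]; rfl)
        simp only [pvAInner, ha]
        rfl
    rw [hstop, pvJoinForm_base]
  | cons m t ih =>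
    intro head hall
    have hm := hall m (by simp)
    simp only [List.cons_append, pvAInner, hm, if_true]
    rw [ih (PySem.Str.rstrip head ++ " " ++ PySem.Str.lstrip m)
        (fun l hl => hall l (by simp at hl ⊢; tauto)), pvJoinForm_step]

-- B's stop counter takes exactly the continuation prefix
theorem pvBStop_take (fid : String) (tail : List String) :
    tail.take (pvBStop fid tail) =
      tail.takeWhile (fun l => PySem.Str.startswith l " " || PySem.Str.startswith l fid) := by
  induction tail with
  | nil => rfl
  | cons l t ih =>
    simp only [pvBStop, List.takeWhile_cons]
    cases h : (PySem.Str.startswith l " " || PySem.Str.startswith l fid) <;> simp [ih]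

-- A's inner while equals B's whole continuation phase
theorem pvAInner_eq_B (fid : String) (tail : List String) (head : String) :
    pvAInner fid tail head =
      (match (tail.take (pvBStop fid tail)).getLast? with
       | none => head
       | some last =>
         PySem.Str.join " " ([PySem.Str.rstrip head] ++
           (((tail.take (pvBStop fid tail)).dropLast.map PySem.Str.strip).filter (fun s => s ≠ "")) ++
           [PySem.Str.lstrip last])) := by
  rw [pvBStop_take]
  set P : String → Bool := fun l => PySem.Str.startswith l " " || PySem.Str.startswith l fid with hP
  cases hrun : (tail.takeWhile P).getLast? with
  | none =>
    -- empty run: the first line of tail (if any) fails P, so the inner while returns head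
    have hnil : tail.takeWhile P = [] := by
      cases hw : tail.takeWhile P with
      | nil => rfl
      | cons a b => rw [hw] at hrun; simp [List.getLast?] at hrun
    cases tail with
    | nil => rfl
    | cons l t =>
      rw [List.takeWhile_cons] at hnil
      by_cases h : P l = true
      · rw [if_pos h] at hnil; exact absurd hnil (by simp)
      · have h' : P l = false := Bool.not_eq_true _ |>.mp h
        rw [hP] at h'
        simp only [pvAInner, h']
        rfl
  | some last =>
    -- non-empty run: split it as mids ++ [last] and use the run lemma
    have hne : tail.takeWhile P ≠ [] := by
      intro hc; rw [hc] at hrun; simp [List.getLast?] at hrun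
    have hsplit : tail.takeWhile P = (tail.takeWhile P).dropLast ++ [last] := by
      conv_lhs => rw [← List.dropLast_append_getLast hne]
      rw [List.getLast?_eq_some_getLast hne] at hrun
      simp at hrun
      rw [hrun]
    have hall : ∀ l ∈ tail.takeWhile P, P l = true := fun l hl => List.mem_takeWhile_imp hl
    have hdrop : tail = tail.takeWhile P ++ tail.dropWhile P := (List.takeWhile_append_dropWhile).symm
    have hr : ∀ a, (tail.dropWhile P).head? = some a → P a = false := by
      intro a ha
      have := List.head?_dropWhile_not P tail
      rw [ha] at this; simpa using this
    have hstep : pvAInner fid tail head =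
        pvAInner fid ((tail.takeWhile P).dropLast ++ [last] ++ tail.dropWhile P) head := by
      conv_lhs => rw [hdrop, hsplit]
    rw [hstep, pvAInner_run fid last (tail.dropWhile P) hr (tail.takeWhile P).dropLast head
        (by rw [← hsplit]; exact hall)]
    rfl

-- A's outer while equals B
theorem pvAOuter_eq_alt (fid : String) (lines : List String) :
    pvAOuter fid lines = get_field_py_alt fid lines := by
  induction lines with
  | nil => rfl
  | cons l rest ih =>
    unfold pvAOuter get_field_py_alt pvBFind
    cases h : PySem.Str.startswith l fid with
    | false =>
      simp only [Bool.false_eq_true, if_false]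
      rw [ih]; rfl
    | true =>
      simp only [if_true]
      rw [pvAInner_eq_B]
      by_cases hI : fid = "I"
      · simp [hI]
      · by_cases hM : fid = "M"
        · simp [hM]
        · simp [hI, hM]

-- ===== VERDICT (by name: the statement is the Claim_ definition above) =====
theorem get_field_py_spec : Claim_equal_get_field_py := by
  intro fid lines _
  unfold Spec_get_field_py get_field_py
  exact pvAOuter_eq_alt fid lines
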